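-- pv_equiv track=rewrite | github.com/emretezel/pyvalue | src/pyvalue/metrics/invested_capital.py | _merge_currency
-- ===== SOURCE A (Python) =====
-- from typing import Optional, Sequence
--
-- def _merge_currency(codes: Sequence[Optional[str]]) -> Optional[str]:
--     merged = None
--     for code in codes:
--         if not code:
--             continue
--         if merged is None:
--             merged = code
--         elif merged != code:
--             return None
--     return merged
-- ===== SOURCE B (Python) =====
-- from typing import Optional, Sequence
--
-- def _merge_currency(codes: Sequence[Optional[str]]) -> Optional[str]:
--     distinct = {c for c in codes if c}
--     return next(iter(distinct)) if len(distinct) == 1 else None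
-- ===== Notes on version B (the rewrite author's own statement) =====
-- stated objective: idiomatic
-- what changed: Replaces the running merged value with early return on mismatch by a one-pass set comprehension of distinct truthy codes followed by a cardinality check.
import Mathlib
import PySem

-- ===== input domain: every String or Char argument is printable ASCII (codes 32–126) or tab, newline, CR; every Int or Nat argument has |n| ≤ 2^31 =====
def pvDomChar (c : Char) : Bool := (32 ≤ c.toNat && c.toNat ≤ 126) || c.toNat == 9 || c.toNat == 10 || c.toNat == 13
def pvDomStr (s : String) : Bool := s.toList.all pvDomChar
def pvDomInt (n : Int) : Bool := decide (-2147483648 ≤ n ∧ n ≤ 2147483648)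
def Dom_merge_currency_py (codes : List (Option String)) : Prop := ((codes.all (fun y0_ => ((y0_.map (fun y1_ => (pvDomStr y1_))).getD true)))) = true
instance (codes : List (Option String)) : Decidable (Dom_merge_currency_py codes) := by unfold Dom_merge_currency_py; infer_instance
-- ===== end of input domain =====

-- B replaces A's running merged value + early return by a set of distinct truthy codes and a cardinality test (idiomatic, same O(n) cost).


-- ===== PORT A =====
-- loop of A: 'merged' accumulator, early return None on mismatch
def mergeLoopA : List (Option String) → Option String → Option String
  | [], merged => merged
  | c :: rest, merged =>
    match c with
    | none => mergeLoopA rest merged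
    | some s =>
      if s = "" then mergeLoopA rest merged
      else
        match merged with
        | none => mergeLoopA rest (some s)
        | some m => if m ≠ s then none else mergeLoopA rest merged

def merge_currency_py (codes : List (Option String)) : Option String :=
  mergeLoopA codes none

-- ===== PORT B =====
-- {c for c in codes if c}: the distinct truthy codes, as a PySem.Set
def truthySet (codes : List (Option String)) : PySem.Set String :=
  PySem.Set.ofList (codes.filterMap (fun c => c.bind (fun s => if s = "" then none else some s)))

-- next(iter(distinct)) if len(distinct) == 1 else None
def merge_currency_py_alt (codes : List (Option String)) : Option String :=
  match truthySet codes with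
  | [s] => some s
  | _ => none

-- ===== PRECONDITION & SPEC =====
def Spec_merge_currency_py (codes : List (Option String)) (out : Option String) : Prop := out = merge_currency_py_alt codes
instance (codes : List (Option String)) (out : Option String) : Decidable (Spec_merge_currency_py codes out) := by unfold Spec_merge_currency_py; infer_instance

-- ===== CLAIM (what is proved, stated in full; the proofs are below) =====
def Claim_equal_merge_currency_py : Prop := ∀ (codes : List (Option String)), Dom_merge_currency_py codes → Spec_merge_currency_py codes (merge_currency_py codes)

-- ===== LEMMAS AND PROOFS =====

def pick (d : List String) : Option String :=
  match d with
  | [s] => some s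
  | _ => none

def truthy (codes : List (Option String)) : List String :=
  codes.filterMap (fun c => c.bind (fun s => if s = "" then none else some s))

lemma length_le_update (xs acc : List String) :
    acc.length ≤ (PySem.Set.update acc xs).length := by
  induction xs generalizing acc with
  | nil => simp [PySem.Set.update]
  | cons x xs ih =>
    calc acc.length ≤ (PySem.Set.add acc x).length := by
          rw [PySem.Set.add_eq_ite]; split <;> simp
      _ ≤ _ := by rw [PySem.Set.update_cons]; exact ih _

lemma pick_long (d : List String) (h : 2 ≤ d.length) : pick d = none := by
  match d, h with
  | a :: b :: rest, _ => rfl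

lemma loop_some (codes : List (Option String)) (m : String) :
    mergeLoopA codes (some m) = pick (PySem.Set.update [m] (truthy codes)) := by
  induction codes with
  | nil => simp [mergeLoopA, truthy, PySem.Set.update_nil, pick]
  | cons c rest ih =>
    match c with
    | none => simpa [mergeLoopA, truthy] using ih
    | some s =>
      by_cases hs : s = ""
      · simp [mergeLoopA, hs, truthy]; simpa [truthy] using ih
      · by_cases hm : m = s
        · subst hm
          simp [mergeLoopA, hs, truthy, PySem.Set.update_cons]
          simpa [truthy] using ih
        · have hne : s ∉ ([m] : List String) := by
            simp only [List.mem_singleton]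
            exact fun h => hm h.symm
          simp [mergeLoopA, hs, hm, truthy, PySem.Set.update_cons,
            PySem.Set.add_of_not_mem hne]
          exact (pick_long _ (le_trans (by simp) (length_le_update _ _))).symm

lemma loop_none (codes : List (Option String)) :
    mergeLoopA codes none = pick (PySem.Set.ofList (truthy codes)) := by
  induction codes with
  | nil => simp [mergeLoopA, truthy, PySem.Set.ofList_nil, pick]
  | cons c rest ih =>
    match c with
    | none => simpa [mergeLoopA, truthy] using ih
    | some s =>
      by_cases hs : s = ""
      · simp [mergeLoopA, hs, truthy]; simpa [truthy] using ih
      · have : PySem.Set.ofList (truthy (some s :: rest))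
            = PySem.Set.update [s] (truthy rest) := by
          simp [truthy, hs, PySem.Set.ofList_eq_foldl, PySem.Set.update,
            PySem.Set.add, PySem.Set.contains]
        simp [mergeLoopA, hs, this]
        exact loop_some rest s

-- ===== VERDICT (by name: the statement is the Claim_ definition above) =====
theorem merge_currency_py_spec : Claim_equal_merge_currency_py := by
  intro codes _
  unfold Spec_merge_currency_py merge_currency_py merge_currency_py_alt
  rw [loop_none]
  rfl
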